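-- pv_equiv track=rewrite | github.com/Shreya-Karia/DSA-Lab-Work | AU2040076_Shreya_Karia/Arrays_Linked_List/Q5.py | insatbeg
-- ===== SOURCE A (Python) =====
-- def insatbeg(arr,el):
--     arr.append(0)
--     i = len(arr) - 1
--     while i>=0:
--         if i != 0:
--             arr[i] = arr[i-1]
--         else:
--             arr[i] = el
--         i = i - 1
--     return arr
-- ===== SOURCE B (Python) =====
-- def insatbeg(arr, el):
--     # Same in-place mutation and identity: bulk slice-assign the prepended contents.
--     arr[:] = [el] + arr
--     return arr
-- ===== Notes on version B (the rewrite author's own statement) =====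
-- stated objective: simpler
-- what changed: Replaces the append-placeholder-and-shift-right loop with a single bulk slice assignment arr[:] = [el] + arr, keeping the in-place mutation and return contract.
import Mathlib
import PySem

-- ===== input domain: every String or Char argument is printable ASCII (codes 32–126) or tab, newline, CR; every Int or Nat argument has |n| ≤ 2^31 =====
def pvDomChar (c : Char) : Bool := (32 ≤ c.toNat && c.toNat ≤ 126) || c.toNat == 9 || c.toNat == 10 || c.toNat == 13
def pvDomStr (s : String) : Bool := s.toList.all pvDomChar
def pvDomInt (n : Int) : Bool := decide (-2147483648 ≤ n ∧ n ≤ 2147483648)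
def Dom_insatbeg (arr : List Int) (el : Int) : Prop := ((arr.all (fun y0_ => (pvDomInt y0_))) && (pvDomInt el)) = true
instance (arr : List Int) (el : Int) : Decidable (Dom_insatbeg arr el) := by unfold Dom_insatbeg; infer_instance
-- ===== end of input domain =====

-- B changes the structure only: A shifts right element by element in a reverse loop;
-- B bulk-assigns [el] + arr in place. Return values proved equal; A mutates its argument
-- in Python and B performs the same mutation (equivalence here is about the return value).

-- ===== PORT A =====
-- Countdown loop: at index i+1 copy arr[i] into arr[i+1]; at index 0 write el.
def insatbegLoop (arr : List Int) (el : Int) : Nat → List Int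
  | 0 => arr.set 0 el
  | i + 1 => insatbegLoop (arr.set (i + 1) (arr.getD i 0)) el i

def insatbeg (arr : List Int) (el : Int) : List Int :=
  let arr2 := arr ++ [0]          -- arr.append(0)
  insatbegLoop arr2 el (arr2.length - 1)

-- ===== PORT B =====
def insatbeg_alt (arr : List Int) (el : Int) : List Int :=
  el :: arr                        -- arr[:] = [el] + arr; return arr

-- ===== PRECONDITION & SPEC =====
def Spec_insatbeg (arr : List Int) (el : Int) (out : List Int) : Prop := out = insatbeg_alt arr el
instance (arr : List Int) (el : Int) (out : List Int) : Decidable (Spec_insatbeg arr el out) := by unfold Spec_insatbeg; infer_instance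

-- ===== CLAIM (what is proved, stated in full; the proofs are below) =====
def Claim_equal_insatbeg : Prop := ∀ (arr : List Int) (el : Int), Dom_insatbeg arr el → Spec_insatbeg arr el (insatbeg arr el)

-- ===== LEMMAS AND PROOFS =====
theorem insatbegLoop_eq (el : Int) :
    ∀ (i : Nat) (l : List Int), i < l.length →
      insatbegLoop l el i = el :: l.take i ++ l.drop (i + 1) := by
  intro i
  induction i with
  | zero =>
    intro l hl
    cases l with
    | nil => simp at hl
    | cons a t => simp [insatbegLoop]
  | succ i ih =>
    intro l hl
    have hi : i + 1 < l.length := hl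
    have hset : l.set (i + 1) (l.getD i 0) =
        l.take (i + 1) ++ l.getD i 0 :: l.drop (i + 2) := by
      rw [List.set_eq_take_append_cons_drop]
      simp [hi]
    have hlen : i < (l.set (i + 1) (l.getD i 0)).length := by
      simp; omega
    rw [insatbegLoop, ih _ hlen, hset]
    have htake : (l.take (i + 1) ++ l.getD i 0 :: l.drop (i + 2)).take i = l.take i := by
      rw [List.take_append_of_le_length (by simp; omega), List.take_take]
      simp
    have hdrop : (l.take (i + 1) ++ l.getD i 0 :: l.drop (i + 2)).drop (i + 1) =
        l.getD i 0 :: l.drop (i + 2) := by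
      rw [List.drop_append_of_le_length (by simp; omega)]
      simp
    rw [htake, hdrop]
    have : l.take (i + 1) = l.take i ++ [l.getD i 0] := by
      rw [List.take_add_one]
      have : l[i]? = some (l[i]'(by omega)) := List.getElem?_eq_getElem (by omega)
      simp [List.getD, this]
    simp [this]

-- ===== VERDICT (by name: the statement is the Claim_ definition above) =====
theorem insatbeg_spec : Claim_equal_insatbeg := by
  intro arr el _
  unfold Spec_insatbeg insatbeg insatbeg_alt
  have h : arr.length < (arr ++ [0]).length := by simp
  simp only [List.length_append, List.length_cons, List.length_nil]
  have := insatbegLoop_eq el arr.length (arr ++ [0]) h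
  simpa using this
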